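-- pv_equiv track=rewrite | github.com/yuexiashanren/emotion-analysis-3 | emotion_value.py | changeArr
-- ===== SOURCE A (Python) =====
-- def changeArr(a,b):
-- 	l = 0
-- 	arr = [ [0]*a for i in range(b) ]
-- 	#情感值取-1/0/1
-- 	for i in range(-1,2):
-- 		for j in range(-1,2):
-- 			for k in range(-1,2):
-- 				arr[l][0] = i
-- 				arr[l][1] = j
-- 				arr[l][2] = k
-- 				l += 1
-- 	return arr
-- ===== SOURCE B (Python) =====
-- def changeArr(a, b):
--     arr = [[0] * a for _ in range(b)]
--     # single flat pass: decode l as a base-3 number to get the triple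
--     for l in range(27):
--         arr[l][0] = l // 9 - 1
--         arr[l][1] = (l // 3) % 3 - 1
--         arr[l][2] = l % 3 - 1
--     return arr
-- ===== Notes on version B (the rewrite author's own statement) =====
-- stated objective: simpler
-- what changed: Replaces the three nested -1..1 loops and the running counter l by a single flat loop over range(27) that decodes each index as a base-3 number (l//9-1, (l//3)%3-1, l%3-1).
import Mathlib
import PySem

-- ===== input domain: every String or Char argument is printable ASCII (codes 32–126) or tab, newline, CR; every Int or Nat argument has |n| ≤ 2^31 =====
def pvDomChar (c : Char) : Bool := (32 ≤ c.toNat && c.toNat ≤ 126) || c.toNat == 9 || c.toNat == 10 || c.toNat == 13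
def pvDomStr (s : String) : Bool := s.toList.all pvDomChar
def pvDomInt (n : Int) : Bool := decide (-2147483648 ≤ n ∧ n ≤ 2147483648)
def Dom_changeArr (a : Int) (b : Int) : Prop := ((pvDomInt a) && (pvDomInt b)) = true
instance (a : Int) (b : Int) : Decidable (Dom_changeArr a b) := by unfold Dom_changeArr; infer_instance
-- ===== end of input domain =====

-- B replaces A's three nested -1..1 loops with a single flat loop over range(27)
-- decoding each index as a base-3 number (simpler decomposition, same cost).

-- shared helper: arr[l][c] = v (both Pythons do exactly this row-column assignment;
-- total form pySetD/pyGetD, used only under Pre_ where the indices are in range)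
def setCell (arr : List (List Int)) (l c v : Int) : List (List Int) :=
  PySem.List.pySetD arr l (PySem.List.pySetD (PySem.List.pyGetD arr l []) c v)

-- ===== PORT A =====
def changeArr (a : Int) (b : Int) : List (List Int) :=
  let arr0 := (PySem.List.pyRange 0 b 1).map (fun _ => List.replicate a.toNat (0 : Int))
  let st := (PySem.List.pyRange (-1) 2 1).foldl (fun st i =>
    (PySem.List.pyRange (-1) 2 1).foldl (fun st j =>
      (PySem.List.pyRange (-1) 2 1).foldl (fun st k =>
        (st.1 + 1, setCell (setCell (setCell st.2 st.1 0 i) st.1 1 j) st.1 2 k)) st) st)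
    ((0 : Int), arr0)
  st.2

-- ===== PORT B =====
def changeArr_alt (a : Int) (b : Int) : List (List Int) :=
  let arr0 := (PySem.List.pyRange 0 b 1).map (fun _ => List.replicate a.toNat (0 : Int))
  (PySem.List.pyRange 0 27 1).foldl (fun arr l =>
    setCell (setCell (setCell arr l 0 (PySem.Int.floordiv l 9 - 1))
      l 1 (PySem.Int.mod (PySem.Int.floordiv l 3) 3 - 1))
      l 2 (PySem.Int.mod l 3 - 1)) arr0

-- ===== PRECONDITION & SPEC =====
-- Pre_: exactly where the Python A returns (it raises IndexError when b < 27 or a < 3)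
def Pre_changeArr (a : Int) (b : Int) : Prop := 3 ≤ a ∧ 27 ≤ b
instance (a : Int) (b : Int) : Decidable (Pre_changeArr a b) := by unfold Pre_changeArr; infer_instance
def pvWitness_changeArr : Int × Int := (3, 27)

def Spec_changeArr (a : Int) (b : Int) (out : List (List Int)) : Prop := out = changeArr_alt a b
instance (a : Int) (b : Int) (out : List (List Int)) : Decidable (Spec_changeArr a b out) := by unfold Spec_changeArr; infer_instance

-- ===== CLAIM (what is proved, stated in full; the proofs are below) =====
def Claim_equal_changeArr : Prop := ∀ (a : Int) (b : Int), Dom_changeArr a b → Pre_changeArr a b → Spec_changeArr a b (changeArr a b)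

-- ===== LEMMAS AND PROOFS =====

-- ===== VERDICT (by name: the statement is the Claim_ definition above) =====
set_option maxRecDepth 8192 in
theorem changeArr_spec : Claim_equal_changeArr := by
  intro a b _ _
  show changeArr a b = changeArr_alt a b
  have hA : PySem.List.pyRange (-1) 2 1 = [-1, 0, 1] := by decide
  have hB : PySem.List.pyRange 0 27 1 =
      [0,1,2,3,4,5,6,7,8,9,10,11,12,13,14,15,16,17,18,19,20,21,22,23,24,25,26] := by decide
  simp only [changeArr, changeArr_alt, hA, hB, List.foldl_cons, List.foldl_nil]
  rfl
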